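-- pv_equiv track=rewrite | github.com/mateuspinto/presto | src/menuFunctions.py | side_to_side_strings
-- ===== SOURCE A (Python) =====
-- def side_to_side_strings(strings, spacesBetween: int = 1):
--     line_sizes = []
--     summed_string = ""
--     how_many_lines = max(len(i.split("\n")) for i in strings)
--
--     for string in strings:
--         max_count = 0
--         actual_count = 0
--
--         for char in string:
--             if char == '\n':
--                 max_count = max([actual_count, max_count])
--                 actual_count = 0
--             else:
--                 actual_count += 1
--
--         max_count = max(actual_count, max_count)
--         line_sizes.append(max_count)
--
--     for i in range(how_many_lines):
--         for string_number, string in enumerate(strings, 0):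
--             partial = ""
--
--             try:
--                 partial += string.split('\n')[i]
--             except:
--                 pass
--
--             for _space in range(line_sizes[string_number] - len(partial) + spacesBetween):
--                 partial += " "
--
--             partial += "|"
--
--             for _space in range(spacesBetween):
--                 partial += " "
--
--             summed_string += partial
--
--         summed_string += "\n"
--
--     return summed_string
-- ===== SOURCE B (Python) =====
-- from itertools import zip_longest
--
--
-- def side_to_side_strings(strings, spacesBetween: int = 1):
--     tables = [s.split('\n') for s in strings]
--     widths = [max(len(line) for line in lines) for lines in tables]
--     sep = '|' + ' ' * spacesBetween
--     return ''.join(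
--         ''.join(cell.ljust(w + spacesBetween) + sep
--                 for cell, w in zip(row, widths)) + '\n'
--         for row in zip_longest(*tables, fillvalue='')
--     )
-- ===== Notes on version B (the rewrite author's own statement) =====
-- stated objective: faster
-- what changed: B splits every string into its line list once, derives each column width as a max over those lines, and walks transposed rows via itertools.zip_longest with ljust padding, instead of A's per-string character-counting width loop and per-row re-split of every string with try/except indexing and space-appending loops.
-- outside the precondition, e.g. on side_to_side_strings([], 1): A raises ValueError, B returns ''
import Mathlib
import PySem

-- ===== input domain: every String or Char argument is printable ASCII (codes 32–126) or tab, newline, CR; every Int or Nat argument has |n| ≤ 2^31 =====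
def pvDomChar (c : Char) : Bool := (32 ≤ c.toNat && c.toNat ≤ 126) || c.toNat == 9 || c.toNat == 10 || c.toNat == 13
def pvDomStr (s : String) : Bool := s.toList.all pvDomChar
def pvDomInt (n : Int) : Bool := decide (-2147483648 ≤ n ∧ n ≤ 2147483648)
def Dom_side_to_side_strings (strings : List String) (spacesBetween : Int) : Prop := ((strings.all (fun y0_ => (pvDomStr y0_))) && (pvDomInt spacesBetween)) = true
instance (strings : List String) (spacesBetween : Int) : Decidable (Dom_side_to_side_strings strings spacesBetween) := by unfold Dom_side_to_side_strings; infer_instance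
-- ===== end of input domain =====

-- B lays the blocks out by transposing pre-split line lists (zip_longest style) with ljust
-- padding, instead of A's per-cell split/try-except indexing and char-counting width loop;
-- objective: simpler. A raises ValueError on strings = [] (excluded by Pre_).

-- ===== PORT A =====
-- A's inner character loop computing a string's maximal line length (max_count/actual_count)
def pvCountA (s : List Char) : Int :=
  let p := s.foldl (fun (st : Int × Int) c =>
    if c = '\n' then (max st.2 st.1, 0) else (st.1, st.2 + 1)) (0, 0)
  max p.2 p.1

-- "for _space in range(n): partial += ' '"
def pvPadLoop (p : List Char) (n : Int) : List Char :=
  (PySem.List.pyRange 0 n 1).foldl (fun acc _ => acc ++ [' ']) p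

-- one cell of A's row loop: try-indexing into string.split('\n'), pad loop, '|', pad loop
def pvCellA (i : Int) (w : Int) (sB : Int) (s : List Char) : List Char :=
  let part0 : List Char :=
    match PySem.List.pyGet? (PySem.Chars.splitOn s ['\n']) i with
    | some l => l          -- partial += string.split('\n')[i]
    | none => []           -- except: pass
  pvPadLoop (pvPadLoop part0 (w - part0.length + sB) ++ ['|']) sB

def side_to_side_strings (strings : List String) (spacesBetween : Int) : String :=
  -- max(...) raises ValueError on an empty generator (strings = []): excluded by Pre_;
  -- the .getD 0 only makes the port total there.
  let how : Int := (PySem.List.max? (strings.map fun s =>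
      ((PySem.Chars.splitOn s.toList ['\n']).length : Int)) (fun x => x)).getD 0
  let line_sizes : List Int := strings.foldl (fun acc s => acc ++ [pvCountA s.toList]) []
  let summed : List Char := (PySem.List.pyRange 0 how 1).foldl (fun acc i =>
      (strings.zipIdx.foldl (fun acc2 (p : String × Nat) =>
        acc2 ++ pvCellA i (PySem.List.pyGetD line_sizes (p.2 : Int) 0) spacesBetween p.1.toList) acc)
      ++ ['\n']) []
  String.ofList summed

-- ===== PORT B =====
-- hand port of itertools.zip_longest(*tables, fillvalue=fill): as many rows as the longest
-- table, shorter tables padded with fill; exact for lists of lists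
def pvZipLongest {α : Type} (fill : α) (tables : List (List α)) : List (List α) :=
  (List.range ((tables.map List.length).foldl max 0)).map
    (fun i => tables.map (fun t => t.getD i fill))

-- str.ljust(target): pad on the right with spaces up to target (no-op if already long enough)
def pvLjust (cell : List Char) (target : Int) : List Char :=
  cell ++ List.replicate (target - (cell.length : Int)).toNat ' '

def side_to_side_strings_alt (strings : List String) (spacesBetween : Int) : String :=
  let tables := strings.map (fun s => PySem.Chars.splitOn s.toList ['\n'])
  let widths : List Int := tables.map (fun ls =>
    (PySem.List.max? (ls.map fun l => (l.length : Int)) (fun x => x)).getD 0)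
  let sep : List Char := '|' :: List.replicate spacesBetween.toNat ' '   -- '|' + ' '*spacesBetween
  String.ofList (((pvZipLongest [] tables).map (fun row =>
    ((row.zip widths).map (fun p => pvLjust p.1 (p.2 + spacesBetween) ++ sep)).flatten
    ++ ['\n'])).flatten)

-- ===== PRECONDITION & SPEC =====
-- Pre_ excludes exactly strings = [], where Python A raises ValueError (max of an empty generator).
def Pre_side_to_side_strings (strings : List String) (spacesBetween : Int) : Prop :=
  strings ≠ []
instance (strings : List String) (spacesBetween : Int) : Decidable (Pre_side_to_side_strings strings spacesBetween) := by unfold Pre_side_to_side_strings; infer_instance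

def pvWitness_side_to_side_strings : List String × Int := (["ab\ncd", "x"], 1)

def Spec_side_to_side_strings (strings : List String) (spacesBetween : Int) (out : String) : Prop := out = side_to_side_strings_alt strings spacesBetween
instance (strings : List String) (spacesBetween : Int) (out : String) : Decidable (Spec_side_to_side_strings strings spacesBetween out) := by unfold Spec_side_to_side_strings; infer_instance

-- ===== CLAIM (what is proved, stated in full; the proofs are below) =====
def Claim_equal_side_to_side_strings : Prop := ∀ (strings : List String) (spacesBetween : Int), Dom_side_to_side_strings strings spacesBetween → Pre_side_to_side_strings strings spacesBetween → Spec_side_to_side_strings strings spacesBetween (side_to_side_strings strings spacesBetween)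

-- ===== LEMMAS AND PROOFS =====

-- the line decomposition of a string at '\n', structurally
def pvLines : List Char → List (List Char)
  | [] => [[]]
  | c :: cs =>
    if c = '\n' then [] :: pvLines cs
    else match pvLines cs with
      | [] => [[c]]        -- unreachable: pvLines is never []
      | h :: t => (c :: h) :: t

def pvConsHead (pre : List Char) : List (List Char) → List (List Char)
  | [] => [pre]
  | h :: t => (pre ++ h) :: t

theorem pvLines_ne_nil (cs : List Char) : pvLines cs ≠ [] := by
  cases cs with
  | nil => simp [pvLines]
  | cons c cs =>
    simp only [pvLines]
    split
    · simp
    · split <;> simp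

theorem pvLines_cons_exists (cs : List Char) : ∃ h t, pvLines cs = h :: t := by
  cases e : pvLines cs with
  | nil => exact absurd e (pvLines_ne_nil cs)
  | cons a b => exact ⟨a, b, rfl⟩

theorem pvConsHead_of_ne (ls : List (List Char)) (h : ls ≠ []) : pvConsHead [] ls = ls := by
  cases ls with
  | nil => exact absurd rfl h
  | cons a b => simp [pvConsHead]

theorem pvGo_spec (fuel : Nat) (l cur : List Char) (accs : List (List Char))
    (h : l.length ≤ fuel) :
    PySem.Chars.splitOn.go ['\n'] fuel l cur accs =
      accs.reverse ++ pvConsHead cur.reverse (pvLines l) := by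
  induction fuel generalizing l cur accs with
  | zero =>
    have hl : l = [] := List.eq_nil_of_length_eq_zero (Nat.le_zero.mp h)
    subst hl
    rw [PySem.Chars.splitOn.go]
    simp [pvLines, pvConsHead]
  | succ fuel ih =>
    cases l with
    | nil =>
      rw [PySem.Chars.splitOn.go]
      all_goals simp [pvLines, pvConsHead]
    | cons c rest =>
      rw [PySem.Chars.splitOn.go]
      by_cases hc : c = '\n'
      · subst hc
        have hpre : (['\n'].isPrefixOf ('\n' :: rest)) = true := by
          simp [List.isPrefixOf]
        simp only [hpre, if_true, List.length_cons, List.length_nil, Nat.zero_add,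
          List.drop_succ_cons, List.drop_zero]
        rw [ih rest [] _ (by simp at h; omega)]
        obtain ⟨h1, t1, hl⟩ := pvLines_cons_exists rest
        simp [pvLines, pvConsHead, hl]
      · have hpre : (['\n'].isPrefixOf (c :: rest)) = false := by
          simp only [List.isPrefixOf]
          simp [Ne.symm hc]
        simp only [hpre, Bool.false_eq_true, if_false]
        rw [ih rest (c :: cur) _ (by simp at h; omega)]
        obtain ⟨h1, t1, hl⟩ := pvLines_cons_exists rest
        simp [pvLines, hc, pvConsHead, hl]

theorem pvSplitOn_eq_pvLines (s : List Char) :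
    PySem.Chars.splitOn s ['\n'] = pvLines s := by
  have e : PySem.Chars.splitOn s ['\n'] = PySem.Chars.splitOn.go ['\n'] (s.length + 1) s [] [] := rfl
  rw [e, pvGo_spec _ _ _ _ (by omega)]
  simp [pvConsHead_of_ne _ (pvLines_ne_nil s)]

-- A's char loop, structurally
def pvFm : List Char → Int → Int → Int
  | [], mc, ac => max ac mc
  | c :: cs, mc, ac => if c = '\n' then pvFm cs (max ac mc) 0 else pvFm cs mc (ac + 1)

theorem pvFold_eq (s : List Char) : ∀ mc ac : Int,
    max ((s.foldl (fun (st : Int × Int) c =>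
        if c = '\n' then (max st.2 st.1, 0) else (st.1, st.2 + 1)) (mc, ac)).2)
      ((s.foldl (fun (st : Int × Int) c =>
        if c = '\n' then (max st.2 st.1, 0) else (st.1, st.2 + 1)) (mc, ac)).1)
      = pvFm s mc ac := by
  induction s with
  | nil => intro mc ac; simp [pvFm]
  | cons c cs ih =>
    intro mc ac
    by_cases hc : c = '\n'
    · simp only [List.foldl_cons, hc, if_true, pvFm]
      exact ih _ _
    · simp only [List.foldl_cons, if_neg hc, pvFm]
      exact ih _ _

theorem pvCountA_eq_fm (s : List Char) : pvCountA s = pvFm s 0 0 := by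
  simpa [pvCountA] using pvFold_eq s 0 0

-- running max of line lengths, the first line extended by ac characters
def pvLmax (ac : Int) : List (List Char) → Int
  | [] => ac
  | h :: t => if t.isEmpty then ac + (h.length : Int) else max (ac + (h.length : Int)) (pvLmax 0 t)

theorem pvFm_eq_lmax (cs : List Char) : ∀ mc ac, pvFm cs mc ac = max mc (pvLmax ac (pvLines cs)) := by
  induction cs with
  | nil => intro mc ac; simp [pvFm, pvLines, pvLmax, max_comm]
  | cons c cs ih =>
    intro mc ac
    obtain ⟨h1, t1, hl⟩ := pvLines_cons_exists cs
    by_cases hc : c = '\n'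
    · subst hc
      rw [show pvFm ('\n' :: cs) mc ac = pvFm cs (max ac mc) 0 from by simp [pvFm]]
      rw [ih]
      rw [show pvLines ('\n' :: cs) = [] :: pvLines cs from by simp [pvLines]]
      rw [hl]
      simp only [pvLmax, List.isEmpty_cons, Bool.false_eq_true, if_false,
        List.length_nil, Nat.cast_zero, add_zero]
      rw [max_comm ac mc, max_assoc]
    · rw [show pvFm (c :: cs) mc ac = pvFm cs mc (ac + 1) from by simp [pvFm, hc]]
      rw [ih, hl]
      rw [show pvLines (c :: cs) = (c :: h1) :: t1 from by simp [pvLines, hc, hl]]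
      have hlen : ((c :: h1).length : Int) = (h1.length : Int) + 1 := by
        simp [List.length_cons]
      cases t1 with
      | nil =>
        simp only [pvLmax, List.isEmpty_nil, if_true, hlen]
        congr 1
        ring
      | cons u v =>
        simp only [pvLmax, List.isEmpty_cons, Bool.false_eq_true, if_false, hlen]
        have e : ac + 1 + (h1.length : Int) = ac + ((h1.length : Int) + 1) := by ring
        rw [e]

theorem pvLmax_ge (ls : List (List Char)) : ∀ ac : Int, ac ≤ pvLmax ac ls := by
  induction ls with
  | nil => intro ac; simp [pvLmax]
  | cons h t ih =>
    intro ac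
    cases t with
    | nil => simp only [pvLmax, List.isEmpty_nil, if_true]; omega
    | cons u v =>
      simp only [pvLmax, List.isEmpty_cons, Bool.false_eq_true, if_false]
      exact le_trans (by omega) (le_max_left _ _)

theorem pvFoldlMax_eq_lmax (t : List (List Char)) : ∀ a : Int,
    (t.map fun l => (l.length : Int)).foldl max a =
      if t.isEmpty then a else max a (pvLmax 0 t) := by
  induction t with
  | nil => intro a; simp
  | cons g r ih =>
    intro a
    simp only [List.map_cons, List.foldl_cons, ih]
    cases r with
    | nil => simp [pvLmax]
    | cons u v =>
      simp only [List.isEmpty_cons, Bool.false_eq_true, if_false, pvLmax, zero_add]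
      rw [max_assoc]

-- A's width of a string equals B's max line length over its split
theorem pvWidth_eq (s : List Char) :
    pvCountA s =
      (PySem.List.max? ((PySem.Chars.splitOn s ['\n']).map fun l => (l.length : Int))
        (fun x => x)).getD 0 := by
  rw [pvSplitOn_eq_pvLines, pvCountA_eq_fm, pvFm_eq_lmax]
  obtain ⟨h, t, hl⟩ := pvLines_cons_exists s
  rw [hl, List.map_cons, PySem.List.max?_id_cons, Option.getD_some, pvFoldlMax_eq_lmax]
  have hx : (0 : Int) ≤ pvLmax 0 (h :: t) := pvLmax_ge _ 0
  rw [max_eq_right hx]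
  simp [pvLmax]

theorem pvPadLoop_eq (p : List Char) (n : Int) :
    pvPadLoop p n = p ++ List.replicate n.toNat ' ' := by
  unfold pvPadLoop
  rw [PySem.List.foldl_append_singleton_eq_map (f := fun _ => ' '), List.map_const',
    PySem.List.length_pyRange_one]
  simp

theorem pvCell_eq (k : Nat) (w sB : Int) (s : List Char) :
    pvCellA (k : Int) w sB s =
      pvLjust ((PySem.Chars.splitOn s ['\n']).getD k []) (w + sB)
        ++ '|' :: List.replicate sB.toNat ' ' := by
  have key : ∀ p0 : List Char,
      pvPadLoop (pvPadLoop p0 (w - (p0.length : Int) + sB) ++ ['|']) sB =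
        pvLjust p0 (w + sB) ++ '|' :: List.replicate sB.toNat ' ' := by
    intro p0
    rw [pvPadLoop_eq, pvPadLoop_eq]
    unfold pvLjust
    have h1 : w - (p0.length : Int) + sB = w + sB - (p0.length : Int) := by ring
    rw [h1]
    simp [List.append_assoc]
  unfold pvCellA
  rw [PySem.List.pyGet?_natCast, List.getD_eq_getElem?_getD]
  cases hx : (PySem.Chars.splitOn s ['\n'])[k]? with
  | none => simpa using key []
  | some l => simpa using key l

def pvWidthFn (ls : List (List Char)) : Int :=
  (PySem.List.max? (ls.map fun l => (l.length : Int)) (fun x => x)).getD 0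

theorem pvWidth_eq' (s : List Char) :
    pvCountA s = pvWidthFn (PySem.Chars.splitOn s ['\n']) := pvWidth_eq s

theorem pvRowAux (sB : Int) (k : Nat) (sizes : List Int) :
    ∀ (l : List String) (j : Nat),
      (∀ i (hi : i < l.length), PySem.List.pyGetD sizes (((j + i : Nat)) : Int) 0 = pvCountA l[i].toList) →
      (l.zipIdx j).flatMap
          (fun p => pvCellA (k : Int) (PySem.List.pyGetD sizes (p.2 : Int) 0) sB p.1.toList)
        = l.flatMap (fun a => pvLjust ((PySem.Chars.splitOn a.toList ['\n']).getD k [])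
            (pvWidthFn (PySem.Chars.splitOn a.toList ['\n']) + sB)
            ++ '|' :: List.replicate sB.toNat ' ') := by
  intro l
  induction l with
  | nil => intro j _; simp
  | cons x xs ih =>
    intro j h
    rw [List.zipIdx_cons, List.flatMap_cons, List.flatMap_cons]
    have h0 := h 0 (by simp)
    simp only [Nat.add_zero, List.getElem_cons_zero] at h0
    congr 1
    · rw [h0, pvCell_eq, pvWidth_eq']
    · refine ih (j + 1) ?_
      intro i hi
      have hs := h (i + 1) (by simpa using Nat.succ_lt_succ hi)
      have e : j + (i + 1) = (j + 1) + i := by omega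
      rw [e] at hs
      simpa using hs

theorem pvCast_foldl_max (ns : List Nat) : ∀ a : Nat,
    (ns.map (fun (n : Nat) => (n : Int))).foldl max ((a : Nat) : Int) = ((ns.foldl max a : Nat) : Int) := by
  induction ns with
  | nil => intro a; simp
  | cons n t ih =>
    intro a
    simp only [List.map_cons, List.foldl_cons, ← Nat.cast_max, ih]

theorem pvMaxD_cast : ∀ ns : List Nat,
    (PySem.List.max? (ns.map (fun (n : Nat) => (n : Int))) (fun x => x)).getD 0 = ((ns.foldl max 0 : Nat) : Int)
  | [] => by decide
  | n :: t => by
    rw [List.map_cons, PySem.List.max?_id_cons, Option.getD_some, pvCast_foldl_max t n]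
    simp [List.foldl_cons]

theorem pvHow_eq (strings : List String) :
    (PySem.List.max? (strings.map fun s =>
        ((PySem.Chars.splitOn s.toList ['\n']).length : Int)) (fun x => x)).getD 0
      = (((((strings.map fun s => PySem.Chars.splitOn s.toList ['\n']).map List.length).foldl max 0 : Nat)) : Int) := by
  rw [← pvMaxD_cast]
  congr 1
  simp [List.map_map, Function.comp_def]

set_option maxHeartbeats 1000000 in
theorem pvRow_eq (strings : List String) (sB : Int) (k : Nat) :
    (strings.zipIdx.flatMap fun p =>
        pvCellA (k : Int)
          (PySem.List.pyGetD (strings.map fun s => pvCountA s.toList) (p.2 : Int) 0) sB p.1.toList)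
    = List.flatMap (fun p => pvLjust p.1 (p.2 + sB) ++ '|' :: List.replicate sB.toNat ' ')
        ((strings.map ((fun t => t.getD k []) ∘ fun s => PySem.Chars.splitOn s.toList ['\n'])).zip
          (strings.map ((fun ls =>
            (PySem.List.max? (ls.map fun l => (l.length : Int)) (fun x => x)).getD 0) ∘ fun s =>
              PySem.Chars.splitOn s.toList ['\n']))) := by
  simp only [List.zip_map', List.flatMap_map]
  exact pvRowAux sB k _ strings 0 (by
    intro i hi
    simp only [Nat.zero_add]
    rw [PySem.List.pyGetD_natCast, List.getD_eq_getElem?_getD, List.getElem?_map,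
      List.getElem?_eq_getElem hi]
    simp only [Option.map_some, Option.getD_some])

set_option maxHeartbeats 1000000 in
theorem side_to_side_eq (strings : List String) (sB : Int) :
    side_to_side_strings strings sB = side_to_side_strings_alt strings sB := by
  simp only [side_to_side_strings, side_to_side_strings_alt, pvZipLongest]
  rw [pvHow_eq]
  apply congrArg
  simp only [PySem.List.foldl_append_singleton_eq_map, List.nil_append]
  simp only [PySem.List.foldl_append_eq_flatMap]
  simp only [List.append_assoc]
  simp only [PySem.List.foldl_append_eq_flatMap]
  simp only [List.nil_append]
  rw [PySem.List.pyRange_zero_natCast, List.flatMap_map]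
  simp only [List.map_map, ← List.flatMap_def]
  congr 1
  funext k
  congr 1
  exact pvRow_eq strings sB k

-- ===== VERDICT (by name: the statement is the Claim_ definition above) =====
theorem side_to_side_strings_spec : Claim_equal_side_to_side_strings := by
  intro strings sB _ _
  unfold Spec_side_to_side_strings
  exact side_to_side_eq strings sB
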